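-- pv_equiv track=rewrite | github.com/orozcojd/Accountability | backend/app/services/influence_service.py | _is_industry_related
-- ===== SOURCE A (Python) =====
-- from typing import Dict, Any, List, Optional, Tuple
--
-- def _is_industry_related(industry: str, bill_categories: List[str]) -> bool:
--     """Check if bill categories relate to an industry."""
--     # Map industries to bill categories
--     industry_category_map = {
--         "pharmaceuticals": ["healthcare"],
--         "oil_gas": ["energy", "environment"],
--         "tech": ["technology"],
--         "finance": ["economy"],
--         "defense": ["defense"],
--         "healthcare": ["healthcare"],
--         "agriculture": ["agriculture"],
--         "telecom": ["technology"],
--         "education": ["education"],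
--         "transportation": ["infrastructure"],
--         "labor": ["labor"],
--         "environment": ["environment"],
--     }
--
--     related_categories = industry_category_map.get(industry, [])
--     return any(cat in bill_categories for cat in related_categories)
-- ===== SOURCE B (Python) =====
-- from typing import List
--
-- # Reverse index: bill category -> industries it is relevant to
-- # (the inversion of A's industry -> categories map).
-- _CATEGORY_TO_INDUSTRIES = {
--     "healthcare": ["pharmaceuticals", "healthcare"],
--     "energy": ["oil_gas"],
--     "environment": ["oil_gas", "environment"],
--     "technology": ["tech", "telecom"],
--     "economy": ["finance"],
--     "defense": ["defense"],
--     "agriculture": ["agriculture"],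
--     "education": ["education"],
--     "infrastructure": ["transportation"],
--     "labor": ["labor"],
-- }
--
-- def _is_industry_related(industry: str, bill_categories: List[str]) -> bool:
--     """Check if bill categories relate to an industry."""
--     return any(industry in _CATEGORY_TO_INDUSTRIES.get(cat, []) for cat in bill_categories)
-- ===== Notes on version B (the rewrite author's own statement) =====
-- stated objective: alternative
-- what changed: B inverts the hard-coded industry->categories map into a category->industries reverse index and scans the input bill_categories testing industry membership, instead of scanning the industry's related-category list against bill_categories.
import Mathlib
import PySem

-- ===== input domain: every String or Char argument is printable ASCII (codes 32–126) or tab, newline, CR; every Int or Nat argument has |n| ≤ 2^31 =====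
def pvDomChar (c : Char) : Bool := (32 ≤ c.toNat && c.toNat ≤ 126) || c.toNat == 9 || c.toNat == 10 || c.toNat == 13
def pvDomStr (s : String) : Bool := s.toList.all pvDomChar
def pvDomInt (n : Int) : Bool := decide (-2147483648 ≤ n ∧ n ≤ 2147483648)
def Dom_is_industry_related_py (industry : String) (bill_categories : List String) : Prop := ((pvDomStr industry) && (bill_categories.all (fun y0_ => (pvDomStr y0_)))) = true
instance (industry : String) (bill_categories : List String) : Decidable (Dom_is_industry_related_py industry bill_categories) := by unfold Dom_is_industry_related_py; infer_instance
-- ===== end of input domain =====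

-- B replaces A's industry→categories lookup with a reverse category→industries index,
-- scanning the input bill_categories instead of the industry's related-category list (objective: alternative).

-- ===== PORT A =====
def is_industry_related_py (industry : String) (bill_categories : List String) : Bool :=
  let industry_category_map : PySem.Dict String (List String) := PySem.Dict.ofList
    [ ("pharmaceuticals", ["healthcare"])
    , ("oil_gas", ["energy", "environment"])
    , ("tech", ["technology"])
    , ("finance", ["economy"])
    , ("defense", ["defense"])
    , ("healthcare", ["healthcare"])
    , ("agriculture", ["agriculture"])
    , ("telecom", ["technology"])
    , ("education", ["education"])
    , ("transportation", ["infrastructure"])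
    , ("labor", ["labor"])
    , ("environment", ["environment"]) ]
  let related_categories := industry_category_map.getD industry []
  related_categories.any (fun cat => bill_categories.contains cat)

-- ===== PORT B =====
def pvCategoryToIndustries : PySem.Dict String (List String) := PySem.Dict.ofList
    [ ("healthcare", ["pharmaceuticals", "healthcare"])
    , ("energy", ["oil_gas"])
    , ("environment", ["oil_gas", "environment"])
    , ("technology", ["tech", "telecom"])
    , ("economy", ["finance"])
    , ("defense", ["defense"])
    , ("agriculture", ["agriculture"])
    , ("education", ["education"])
    , ("infrastructure", ["transportation"])
    , ("labor", ["labor"]) ]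

def is_industry_related_py_alt (industry : String) (bill_categories : List String) : Bool :=
  bill_categories.any (fun cat => (pvCategoryToIndustries.getD cat []).contains industry)

-- ===== PRECONDITION & SPEC =====
def Spec_is_industry_related_py (industry : String) (bill_categories : List String) (out : Bool) : Prop := out = is_industry_related_py_alt industry bill_categories
instance (industry : String) (bill_categories : List String) (out : Bool) : Decidable (Spec_is_industry_related_py industry bill_categories out) := by unfold Spec_is_industry_related_py; infer_instance

-- ===== CLAIM (what is proved, stated in full; the proofs are below) =====
def Claim_equal_is_industry_related_py : Prop := ∀ (industry : String) (bill_categories : List String), Dom_is_industry_related_py industry bill_categories → Spec_is_industry_related_py industry bill_categories (is_industry_related_py industry bill_categories)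

-- ===== LEMMAS AND PROOFS =====

-- The industry/category relation that both tables encode, as a flat list of pairs.
def pvRel : List (String × String) :=
  [ ("pharmaceuticals", "healthcare")
  , ("oil_gas", "energy")
  , ("oil_gas", "environment")
  , ("tech", "technology")
  , ("finance", "economy")
  , ("defense", "defense")
  , ("healthcare", "healthcare")
  , ("agriculture", "agriculture")
  , ("telecom", "technology")
  , ("education", "education")
  , ("transportation", "infrastructure")
  , ("labor", "labor")
  , ("environment", "environment") ]

-- A's table in literal Dict.mk form.
def pvAmk : PySem.Dict String (List String) := PySem.Dict.mk
    [ ("pharmaceuticals", ["healthcare"])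
    , ("oil_gas", ["energy", "environment"])
    , ("tech", ["technology"])
    , ("finance", ["economy"])
    , ("defense", ["defense"])
    , ("healthcare", ["healthcare"])
    , ("agriculture", ["agriculture"])
    , ("telecom", ["technology"])
    , ("education", ["education"])
    , ("transportation", ["infrastructure"])
    , ("labor", ["labor"])
    , ("environment", ["environment"]) ]

lemma pvA_ofList : (PySem.Dict.ofList
    [ ("pharmaceuticals", ["healthcare"])
    , ("oil_gas", ["energy", "environment"])
    , ("tech", ["technology"])
    , ("finance", ["economy"])
    , ("defense", ["defense"])
    , ("healthcare", ["healthcare"])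
    , ("agriculture", ["agriculture"])
    , ("telecom", ["technology"])
    , ("education", ["education"])
    , ("transportation", ["infrastructure"])
    , ("labor", ["labor"])
    , ("environment", ["environment"]) ] : PySem.Dict String (List String)) = pvAmk := by decide

lemma pvB_mk : pvCategoryToIndustries = PySem.Dict.mk
    [ ("healthcare", ["pharmaceuticals", "healthcare"])
    , ("energy", ["oil_gas"])
    , ("environment", ["oil_gas", "environment"])
    , ("technology", ["tech", "telecom"])
    , ("economy", ["finance"])
    , ("defense", ["defense"])
    , ("agriculture", ["agriculture"])
    , ("education", ["education"])
    , ("infrastructure", ["transportation"])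
    , ("labor", ["labor"]) ] := by decide

-- A's lookup: c is among industry ind's related categories iff (ind, c) ∈ pvRel.
lemma pvAchar (ind c : String) : ((pvAmk.getD ind []).contains c) = pvRel.contains (ind, c) := by
  apply Bool.eq_iff_iff.mpr
  simp only [pvAmk, PySem.Dict.getD_eq_get?_getD, PySem.Dict.get?_mk_cons, beq_iff_eq]
  by_cases h1 : ("pharmaceuticals" : String) = ind
  · subst h1; simp [pvRel]; try tauto
  · rw [if_neg h1]
    by_cases h2 : ("oil_gas" : String) = ind
    · subst h2; simp [pvRel]; try tauto
    · rw [if_neg h2]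
      by_cases h3 : ("tech" : String) = ind
      · subst h3; simp [pvRel]; try tauto
      · rw [if_neg h3]
        by_cases h4 : ("finance" : String) = ind
        · subst h4; simp [pvRel]; try tauto
        · rw [if_neg h4]
          by_cases h5 : ("defense" : String) = ind
          · subst h5; simp [pvRel]; try tauto
          · rw [if_neg h5]
            by_cases h6 : ("healthcare" : String) = ind
            · subst h6; simp [pvRel]; try tauto
            · rw [if_neg h6]
              by_cases h7 : ("agriculture" : String) = ind
              · subst h7; simp [pvRel]; try tauto
              · rw [if_neg h7]
                by_cases h8 : ("telecom" : String) = ind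
                · subst h8; simp [pvRel]; try tauto
                · rw [if_neg h8]
                  by_cases h9 : ("education" : String) = ind
                  · subst h9; simp [pvRel]; try tauto
                  · rw [if_neg h9]
                    by_cases h10 : ("transportation" : String) = ind
                    · subst h10; simp [pvRel]; try tauto
                    · rw [if_neg h10]
                      by_cases h11 : ("labor" : String) = ind
                      · subst h11; simp [pvRel]; try tauto
                      · rw [if_neg h11]
                        by_cases h12 : ("environment" : String) = ind
                        · subst h12; simp [pvRel]; try tauto
                        · rw [if_neg h12]
                          simp [PySem.Dict.get?, pvRel, Ne.symm h1, Ne.symm h2, Ne.symm h3, Ne.symm h4, Ne.symm h5, Ne.symm h6, Ne.symm h7, Ne.symm h8, Ne.symm h9, Ne.symm h10, Ne.symm h11, Ne.symm h12]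

-- B's reverse lookup: ind is among category c's industries iff (ind, c) ∈ pvRel.
lemma pvBchar (ind c : String) : ((pvCategoryToIndustries.getD c []).contains ind) = pvRel.contains (ind, c) := by
  rw [pvB_mk]
  apply Bool.eq_iff_iff.mpr
  simp only [PySem.Dict.getD_eq_get?_getD, PySem.Dict.get?_mk_cons, beq_iff_eq]
  by_cases h1 : ("healthcare" : String) = c
  · subst h1; simp [pvRel]; try tauto
  · rw [if_neg h1]
    by_cases h2 : ("energy" : String) = c
    · subst h2; simp [pvRel]; try tauto
    · rw [if_neg h2]
      by_cases h3 : ("environment" : String) = c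
      · subst h3; simp [pvRel]; try tauto
      · rw [if_neg h3]
        by_cases h4 : ("technology" : String) = c
        · subst h4; simp [pvRel]; try tauto
        · rw [if_neg h4]
          by_cases h5 : ("economy" : String) = c
          · subst h5; simp [pvRel]; try tauto
          · rw [if_neg h5]
            by_cases h6 : ("defense" : String) = c
            · subst h6; simp [pvRel]; try tauto
            · rw [if_neg h6]
              by_cases h7 : ("agriculture" : String) = c
              · subst h7; simp [pvRel]; try tauto
              · rw [if_neg h7]
                by_cases h8 : ("education" : String) = c
                · subst h8; simp [pvRel]; try tauto
                · rw [if_neg h8]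
                  by_cases h9 : ("infrastructure" : String) = c
                  · subst h9; simp [pvRel]; try tauto
                  · rw [if_neg h9]
                    by_cases h10 : ("labor" : String) = c
                    · subst h10; simp [pvRel]; try tauto
                    · rw [if_neg h10]
                      simp [PySem.Dict.get?, pvRel, Ne.symm h1, Ne.symm h2, Ne.symm h3, Ne.symm h4, Ne.symm h5, Ne.symm h6, Ne.symm h7, Ne.symm h8, Ne.symm h9, Ne.symm h10]

-- ===== VERDICT (by name: the statement is the Claim_ definition above) =====
theorem is_industry_related_py_spec : Claim_equal_is_industry_related_py := by
  intro industry bill_categories _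
  unfold Spec_is_industry_related_py is_industry_related_py is_industry_related_py_alt
  rw [pvA_ofList]
  apply Bool.eq_iff_iff.mpr
  simp only [List.any_eq_true, List.contains_iff_mem]
  constructor
  · rintro ⟨cat, hmem, hc⟩
    have h2 : cat ∈ pvAmk.getD industry [] ↔ industry ∈ pvCategoryToIndustries.getD cat [] := by
      rw [← List.contains_iff_mem, ← List.contains_iff_mem,
        (pvAchar industry cat).trans (pvBchar industry cat).symm]
    exact ⟨cat, hc, h2.mp hmem⟩
  · rintro ⟨cat, hmem, hc⟩
    have h2 : cat ∈ pvAmk.getD industry [] ↔ industry ∈ pvCategoryToIndustries.getD cat [] := by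
      rw [← List.contains_iff_mem, ← List.contains_iff_mem,
        (pvAchar industry cat).trans (pvBchar industry cat).symm]
    exact ⟨cat, h2.mpr hc, hmem⟩
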